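-- pv_equiv track=rewrite | github.com/khris-xp/object-oriented-data-structure | Python2/ex04.py | hbd
-- ===== SOURCE A (Python) =====
-- def hbd(number):
--     def convert_to_base(number, base):
--         converted_number = ""
--         while number > 0:
--             digit = number % base
--             converted_number = str(digit) + converted_number
--             number //= base
--         return converted_number
--
--     for base in range(2, number + 1):
--         converted = convert_to_base(number, base)
--         if converted == "21" or converted == "20":
--             return base, converted
--     return None
-- ===== SOURCE B (Python) =====
-- def hbd(number):
--     # n reads as "21" in base b iff n == 2*b + 1 with b > 2 (so n odd, n >= 7);
--     # as "20" iff n == 2*b with b > 2 (n even, n >= 6).  The matching base is unique,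
--     # so the smallest one is given directly by a closed formula.
--     if number < 6:
--         return None
--     if number % 2 == 0:
--         return number // 2, "20"
--     return (number - 1) // 2, "21"
-- ===== Notes on version B (the rewrite author's own statement) =====
-- stated objective: faster
-- what changed: Replaces the scan over all bases 2..n with repeated base conversion by a closed-form rule: the unique base writing n as '20' is n/2 (n even, n>=6) and as '21' is (n-1)/2 (n odd, n>=7), so B answers in O(1).
import Mathlib
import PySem

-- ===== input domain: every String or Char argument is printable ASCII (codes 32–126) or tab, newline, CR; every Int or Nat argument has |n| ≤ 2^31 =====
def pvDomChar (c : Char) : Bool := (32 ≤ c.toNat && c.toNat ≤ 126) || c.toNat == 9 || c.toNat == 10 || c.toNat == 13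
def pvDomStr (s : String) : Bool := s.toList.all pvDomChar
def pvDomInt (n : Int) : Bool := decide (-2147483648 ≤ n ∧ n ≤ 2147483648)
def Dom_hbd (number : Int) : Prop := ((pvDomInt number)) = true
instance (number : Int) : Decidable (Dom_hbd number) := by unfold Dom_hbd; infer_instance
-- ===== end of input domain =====

-- B replaces A's scan over every base 2..n (converting n to each base) by the closed-form
-- unique base (n/2 for '20', (n-1)/2 for '21'); objective: faster.

-- ===== PORT A =====
-- 'while number > 0' of convert_to_base; fuel number.toNat only guards totality (each
-- iteration with base ≥ 2 strictly shrinks number towards 0, so the fuel is never exhausted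
-- for the bases A uses).  The string is built as its List Char per the PySem convention.
def pyConvertLoop (fuel : Nat) (number base : Int) (acc : List Char) : List Char :=
  match fuel with
  | 0 => acc
  | f + 1 =>
    if 0 < number then
      pyConvertLoop f (PySem.Int.floordiv number base) base
        (PySem.Int.toChars (PySem.Int.mod number base) ++ acc)
    else acc

def convertToBase (number base : Int) : List Char :=
  pyConvertLoop number.toNat number base []

def hbdLoop (number : Int) : List Int → Option (Int × String)
  | [] => none
  | base :: rest =>
    let converted := convertToBase number base
    if converted = ['2', '1'] ∨ converted = ['2', '0'] then
      some (base, String.ofList converted)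
    else hbdLoop number rest

def hbd (number : Int) : Option (Int × String) :=
  hbdLoop number (PySem.List.pyRange 2 (number + 1) 1)

-- ===== PORT B =====
def hbd_alt (number : Int) : Option (Int × String) :=
  if number < 6 then none
  else if PySem.Int.mod number 2 = 0 then some (PySem.Int.floordiv number 2, "20")
  else some (PySem.Int.floordiv (number - 1) 2, "21")

-- ===== PRECONDITION & SPEC =====
def Spec_hbd (number : Int) (out : Option (Int × String)) : Prop := out = hbd_alt number
instance (number : Int) (out : Option (Int × String)) : Decidable (Spec_hbd number out) := by unfold Spec_hbd; infer_instance

-- ===== CLAIM (what is proved, stated in full; the proofs are below) =====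
def Claim_equal_hbd : Prop := ∀ (number : Int), Dom_hbd number → Spec_hbd number (hbd number)

-- ===== LEMMAS AND PROOFS =====

lemma toChars_nonneg_ne_nil (d : Int) (hd : 0 ≤ d) : PySem.Int.toChars d ≠ [] := by
  simp only [PySem.Int.toChars, if_neg (by omega : ¬ d < 0)]
  have := @Nat.length_toDigits_pos 10 d.toNat
  intro h; simp [h] at this

lemma toChars_len_one (d : Int) (h0 : 0 ≤ d) (h10 : d < 10) :
    PySem.Int.toChars d = [d.toNat.digitChar] := by
  simp only [PySem.Int.toChars, if_neg (by omega : ¬ d < 0)]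
  exact Nat.toDigits_of_lt_base (by omega)

lemma toChars_two_le_length (d : Int) (h : 10 ≤ d) : 2 ≤ (PySem.Int.toChars d).length := by
  simp only [PySem.Int.toChars, if_neg (by omega : ¬ d < 0)]
  by_contra hlt
  have h1 : (Nat.toDigits 10 d.toNat).length ≤ 1 := by omega
  rw [Nat.length_toDigits_le_iff (by omega) (by omega)] at h1
  omega

lemma toChars_pair (q d : Int) (hq : 0 ≤ q) (hd : 0 ≤ d) (c0 c1 : Char)
    (h : PySem.Int.toChars q ++ PySem.Int.toChars d = [c0, c1]) :
    PySem.Int.toChars q = [c0] ∧ PySem.Int.toChars d = [c1] := by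
  have hlq : 1 ≤ (PySem.Int.toChars q).length := by
    cases hx : PySem.Int.toChars q with
    | nil => exact absurd hx (toChars_nonneg_ne_nil q hq)
    | cons a l => simp
  have hld : 1 ≤ (PySem.Int.toChars d).length := by
    cases hx : PySem.Int.toChars d with
    | nil => exact absurd hx (toChars_nonneg_ne_nil d hd)
    | cons a l => simp
  have hlen : (PySem.Int.toChars q).length + (PySem.Int.toChars d).length = 2 := by
    have := congrArg List.length h; simpa using this
  have h1 : (PySem.Int.toChars q).length = 1 := by omega
  have h2 : (PySem.Int.toChars d).length = 1 := by omega
  obtain ⟨a, ha⟩ := List.length_eq_one_iff.mp h1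
  obtain ⟨b, hb⟩ := List.length_eq_one_iff.mp h2
  rw [ha, hb] at h
  simp at h
  exact ⟨by rw [ha, h.1], by rw [hb, h.2]⟩

lemma toChars_eq_digit (d : Int) (h0 : 0 ≤ d) (c : Char) (h : PySem.Int.toChars d = [c]) :
    d < 10 ∧ c = d.toNat.digitChar := by
  by_cases h10 : d < 10
  · refine ⟨h10, ?_⟩
    rw [toChars_len_one d h0 h10] at h
    simpa using h.symm
  · exfalso
    have := toChars_two_le_length d (by omega)
    rw [h] at this; simp at this
lemma pyConvertLoop_append (f : Nat) (n b : Int) (acc : List Char) :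
    pyConvertLoop f n b acc = pyConvertLoop f n b [] ++ acc := by
  induction f generalizing n acc with
  | zero => simp [pyConvertLoop]
  | succ f ih =>
    simp only [pyConvertLoop]
    split_ifs with h
    · rw [ih, ih (PySem.Int.floordiv n b) (PySem.Int.toChars (PySem.Int.mod n b) ++ [])]
      simp
    · simp

lemma pyConvertLoop_nonpos (f : Nat) (n b : Int) (acc : List Char) (h : ¬ 0 < n) :
    pyConvertLoop f n b acc = acc := by
  cases f <;> simp [pyConvertLoop, h]

lemma pyConvertLoop_pos_ne_nil (f : Nat) (n b : Int) (hf : 0 < f) (hn : 0 < n) (hb : 0 < b) :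
    pyConvertLoop f n b [] ≠ [] := by
  obtain ⟨f', rfl⟩ : ∃ f', f = f' + 1 := ⟨f - 1, by omega⟩
  simp only [pyConvertLoop, if_pos hn]
  rw [pyConvertLoop_append]
  intro h
  rcases List.append_eq_nil_iff.mp h with ⟨-, h2⟩
  have := toChars_nonneg_ne_nil _ (PySem.Int.mod_nonneg n hb)
  simp at h2
  exact this h2

lemma ne_nil_one_le_length {l : List Char} (h : l ≠ []) : 1 ≤ l.length := by
  cases l with
  | nil => exact absurd rfl h
  | cons a t => simp

lemma conv_match (n b : Int) (hb : 2 ≤ b) (hbn : b ≤ n)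
    (h : convertToBase n b = ['2', '1'] ∨ convertToBase n b = ['2', '0']) :
    3 ≤ b ∧ (n = 2 * b + 1 ∨ n = 2 * b) := by
  have hn : 0 < n := by omega
  have hq1 : 1 ≤ PySem.Int.floordiv n b := (PySem.Int.le_floordiv_iff_mul_le (by omega)).mpr (by omega)
  have hr0 : 0 ≤ PySem.Int.mod n b := PySem.Int.mod_nonneg n (by omega)
  have heq : PySem.Int.floordiv n b * b + PySem.Int.mod n b = n := PySem.Int.floordiv_mul_add_mod n b
  unfold convertToBase at h
  obtain ⟨f, hf1, hf2⟩ : ∃ f, n.toNat = f + 1 ∧ 1 ≤ f := ⟨n.toNat - 1, by omega, by omega⟩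
  rw [hf1] at h
  simp only [pyConvertLoop, if_pos hn] at h
  obtain ⟨f', rfl⟩ : ∃ f', f = f' + 1 := ⟨f - 1, by omega⟩
  simp only [pyConvertLoop, if_pos (show (0:Int) < PySem.Int.floordiv n b by omega)] at h
  rw [pyConvertLoop_append] at h
  set r := PySem.Int.mod n b with hr
  set q := PySem.Int.floordiv n b with hq
  set q2 := PySem.Int.floordiv q b with hq2
  by_cases hq2p : 0 < q2
  · exfalso
    have hqb : b ≤ q := by
      by_contra hlt
      have : q2 < 1 := (PySem.Int.floordiv_lt_iff_lt_mul (by omega : (0:Int) < b)).mpr (by omega)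
      omega
    have hn4 : 4 ≤ n := by nlinarith
    have hne : pyConvertLoop f' q2 b [] ≠ [] :=
      pyConvertLoop_pos_ne_nil _ _ _ (by omega) hq2p (by omega)
    have l1 := ne_nil_one_le_length hne
    have l2 := ne_nil_one_le_length (toChars_nonneg_ne_nil _ (PySem.Int.mod_nonneg q (b := b) (by omega)))
    have l3 := ne_nil_one_le_length (toChars_nonneg_ne_nil _ hr0)
    rcases h with h | h <;> · have := congrArg List.length h; simp at this; omega
  · rw [pyConvertLoop_nonpos _ _ _ _ hq2p] at h
    have hqb : q < b := by
      by_contra hge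
      have : 1 ≤ q2 := (PySem.Int.le_floordiv_iff_mul_le (by omega : (0:Int) < b)).mpr (by omega)
      omega
    have hmq : PySem.Int.mod q b = q := by
      rw [PySem.Int.mod_eq_emod_of_pos (by omega)]; exact Int.emod_eq_of_lt (by omega) (by omega)
    rw [hmq] at h
    simp only [List.append_nil] at h
    have main : q = 2 ∧ (r = 1 ∨ r = 0) := by
      rcases h with h | h
      · obtain ⟨h1, h2⟩ := toChars_pair q r (by omega) hr0 _ _ h
        obtain ⟨hql, hc1⟩ := toChars_eq_digit q (by omega) _ h1
        obtain ⟨hrl, hc2⟩ := toChars_eq_digit r hr0 _ h2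
        have e1 : q.toNat.digitChar = '2' := hc1.symm
        have e2 : r.toNat.digitChar = '1' := hc2.symm
        have : q.toNat = 2 ∧ r.toNat = 1 := by
          constructor
          · have h10 : q.toNat < 10 := by omega
            interval_cases hh : q.toNat <;> first | omega | exact absurd e1 (by decide)
          · have h10 : r.toNat < 10 := by omega
            interval_cases hh : r.toNat <;> first | omega | exact absurd e2 (by decide)
        omega
      · obtain ⟨h1, h2⟩ := toChars_pair q r (by omega) hr0 _ _ h
        obtain ⟨hql, hc1⟩ := toChars_eq_digit q (by omega) _ h1
        obtain ⟨hrl, hc2⟩ := toChars_eq_digit r hr0 _ h2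
        have e1 : q.toNat.digitChar = '2' := hc1.symm
        have e2 : r.toNat.digitChar = '0' := hc2.symm
        have : q.toNat = 2 ∧ r.toNat = 0 := by
          constructor
          · have h10 : q.toNat < 10 := by omega
            interval_cases hh : q.toNat <;> first | omega | exact absurd e1 (by decide)
          · have h10 : r.toNat < 10 := by omega
            interval_cases hh : r.toNat <;> first | omega | exact absurd e2 (by decide)
        omega
    obtain ⟨hqe, hre⟩ := main
    rw [hqe] at heq hqb
    omega

lemma conv_20 (b : Int) (hb : 3 ≤ b) : convertToBase (2 * b) b = ['2', '0'] := by
  unfold convertToBase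
  obtain ⟨f, hf1, hf2⟩ : ∃ f, (2 * b).toNat = f + 1 ∧ 1 ≤ f := ⟨(2 * b).toNat - 1, by omega, by omega⟩
  rw [hf1]
  simp only [pyConvertLoop, if_pos (by omega : (0:Int) < 2 * b)]
  have hm : PySem.Int.mod (2 * b) b = 0 := (PySem.Int.mod_eq_zero_iff_dvd _ _).mpr ⟨2, by ring⟩
  have hd : PySem.Int.floordiv (2 * b) b = 2 :=
    (PySem.Int.floordiv_eq_iff_of_pos (by omega)).mpr ⟨by omega, by omega⟩
  rw [hm, hd]
  obtain ⟨f', rfl⟩ : ∃ f', f = f' + 1 := ⟨f - 1, by omega⟩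
  simp only [pyConvertLoop, if_pos (by omega : (0:Int) < 2)]
  have hm2 : PySem.Int.mod 2 b = 2 := by
    rw [PySem.Int.mod_eq_emod_of_pos (by omega)]; exact Int.emod_eq_of_lt (by omega) (by omega)
  have hd2 : PySem.Int.floordiv 2 b = 0 :=
    (PySem.Int.floordiv_eq_iff_of_pos (by omega)).mpr ⟨by omega, by omega⟩
  rw [hm2, hd2, pyConvertLoop_nonpos _ _ _ _ (by omega)]
  rw [show PySem.Int.toChars 0 = ['0'] from by decide,
      show PySem.Int.toChars 2 = ['2'] from by decide]
  rfl

lemma conv_21 (b : Int) (hb : 3 ≤ b) : convertToBase (2 * b + 1) b = ['2', '1'] := by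
  unfold convertToBase
  obtain ⟨f, hf1, hf2⟩ : ∃ f, (2 * b + 1).toNat = f + 1 ∧ 1 ≤ f := ⟨(2 * b + 1).toNat - 1, by omega, by omega⟩
  rw [hf1]
  simp only [pyConvertLoop, if_pos (by omega : (0:Int) < 2 * b + 1)]
  have hd : PySem.Int.floordiv (2 * b + 1) b = 2 :=
    (PySem.Int.floordiv_eq_iff_of_pos (by omega)).mpr ⟨by omega, by omega⟩
  have hm : PySem.Int.mod (2 * b + 1) b = 1 := by
    have := PySem.Int.floordiv_mul_add_mod (2 * b + 1) b
    rw [hd] at this; omega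
  rw [hm, hd]
  obtain ⟨f', rfl⟩ : ∃ f', f = f' + 1 := ⟨f - 1, by omega⟩
  simp only [pyConvertLoop, if_pos (by omega : (0:Int) < 2)]
  have hm2 : PySem.Int.mod 2 b = 2 := by
    rw [PySem.Int.mod_eq_emod_of_pos (by omega)]; exact Int.emod_eq_of_lt (by omega) (by omega)
  have hd2 : PySem.Int.floordiv 2 b = 0 :=
    (PySem.Int.floordiv_eq_iff_of_pos (by omega)).mpr ⟨by omega, by omega⟩
  rw [hm2, hd2, pyConvertLoop_nonpos _ _ _ _ (by omega)]
  rw [show PySem.Int.toChars 1 = ['1'] from by decide,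
      show PySem.Int.toChars 2 = ['2'] from by decide]
  rfl

def NoM (n b : Int) : Prop :=
  convertToBase n b ≠ ['2', '1'] ∧ convertToBase n b ≠ ['2', '0']

lemma loop_none (n : Int) (a : Int) (h : ∀ b, a ≤ b → b < n + 1 → NoM n b) :
    hbdLoop n (PySem.List.pyRange a (n + 1) 1) = none := by
  by_cases hlt : a < n + 1
  · rw [PySem.List.pyRange_one_cons hlt]
    simp only [hbdLoop]
    have hna := h a le_rfl hlt
    rw [if_neg (by rintro (h1 | h2); exacts [hna.1 h1, hna.2 h2])]
    exact loop_none n (a + 1) (fun b h1 h2 => h b (by omega) h2)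
  · rw [show PySem.List.pyRange a (n + 1) 1 = [] from by
      simp [PySem.List.pyRange]; omega]
    rfl
termination_by (n + 1 - a).toNat
decreasing_by omega

lemma loop_first (n : Int) (a b0 : Int) (cl : List Char)
    (hab : a ≤ b0) (hbn : b0 ≤ n)
    (hno : ∀ b, a ≤ b → b < b0 → NoM n b)
    (hcl : cl = ['2', '1'] ∨ cl = ['2', '0'])
    (hconv : convertToBase n b0 = cl) :
    hbdLoop n (PySem.List.pyRange a (n + 1) 1) = some (b0, String.ofList cl) := by
  rw [PySem.List.pyRange_one_cons (by omega)]
  simp only [hbdLoop]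
  by_cases hstop : a = b0
  · subst hstop
    rw [if_pos (by rw [hconv]; rcases hcl with h | h; exacts [Or.inl h, Or.inr h])]
    rw [hconv]
  · have hna := hno a le_rfl (by omega)
    rw [if_neg (by rintro (h1 | h2); exacts [hna.1 h1, hna.2 h2])]
    exact loop_first n (a + 1) b0 cl (by omega) hbn (fun b h1 h2 => hno b (by omega) h2) hcl hconv
termination_by (b0 - a).toNat
decreasing_by omega

-- ===== VERDICT (by name: the statement is the Claim_ definition above) =====
theorem hbd_spec : Claim_equal_hbd := by
  intro n _
  unfold Spec_hbd hbd hbd_alt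
  by_cases h6 : n < 6
  · rw [if_pos h6]
    apply loop_none
    intro b h1 h2
    constructor <;> intro hc
    · have := conv_match n b (by omega) (by omega) (Or.inl hc); omega
    · have := conv_match n b (by omega) (by omega) (Or.inr hc); omega
  · rw [if_neg h6]
    rcases PySem.Int.mod_two_eq n with hm | hm
    · rw [if_pos hm]
      have heq : PySem.Int.floordiv n 2 * 2 + PySem.Int.mod n 2 = n :=
        PySem.Int.floordiv_mul_add_mod n 2
      rw [hm] at heq
      obtain ⟨B, hB⟩ : ∃ B, PySem.Int.floordiv n 2 = B := ⟨_, rfl⟩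
      rw [hB] at heq ⊢
      have hb3 : 3 ≤ B := by omega
      rw [loop_first n 2 B ['2', '0'] (by omega) (by omega)
        (fun b hb1 hb2 => by
          constructor <;> intro hc
          · have := conv_match n b (by omega) (by omega) (Or.inl hc); omega
          · have := conv_match n b (by omega) (by omega) (Or.inr hc); omega)
        (Or.inr rfl)
        (by rw [show n = 2 * B from by omega]; exact conv_20 _ hb3)]
    · rw [if_neg (by omega)]
      have heq : PySem.Int.floordiv n 2 * 2 + PySem.Int.mod n 2 = n :=
        PySem.Int.floordiv_mul_add_mod n 2
      rw [hm] at heq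
      obtain ⟨B, hB⟩ : ∃ B, PySem.Int.floordiv (n - 1) 2 = B := ⟨_, rfl⟩
      have hd : PySem.Int.floordiv n 2 = B := by
        rw [← hB]
        exact ((PySem.Int.floordiv_eq_iff_of_pos (by omega)).mpr ⟨by omega, by omega⟩).symm
      rw [hd] at heq
      rw [hB]
      have hb3 : 3 ≤ B := by omega
      rw [loop_first n 2 B ['2', '1'] (by omega) (by omega)
        (fun b hb1 hb2 => by
          constructor <;> intro hc
          · have := conv_match n b (by omega) (by omega) (Or.inl hc); omega
          · have := conv_match n b (by omega) (by omega) (Or.inr hc); omega)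
        (Or.inl rfl)
        (by rw [show n = 2 * B + 1 from by omega]; exact conv_21 _ hb3)]
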